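-- pv_equiv track=rewrite | github.com/stbrumme/leetcode | 2231.py | largestInteger
-- ===== SOURCE A (Python) =====
-- def largestInteger(num: int) -> int:
--     s = str(num)
--
--     parity = [ int(c) & 1 for c in s ]
--     digits = { 0: [], 1: [] }
--     for i in range(len(s)):
--         digits[parity[i]].append(s[i])
--
--     # reverse order makes more sense, but popping the last item in the following loop is faster
--     digits[0].sort()
--     digits[1].sort()
--
--     result = ""
--     for p in parity:
--         result += digits[p].pop()
--     return int(result)
-- ===== SOURCE B (Python) =====
-- def largestInteger(num: int) -> int:
--     # extract digits arithmetically (no str(num)), least significant first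
--     digs = []
--     n = num
--     while n > 9:
--         n, d = divmod(n, 10)
--         digs.append(d)
--     digs.append(n)
--     # ascending sorted digits per parity
--     evens = sorted(d for d in digs if d % 2 == 0)
--     odds = sorted(d for d in digs if d % 2 == 1)
--     # walk the number least-significant first, giving the smallest still-unused
--     # digit of matching parity to the lowest place, via two index pointers
--     out = []
--     ei = oi = 0
--     for d in digs:
--         if d % 2 == 0:
--             out.append(evens[ei])
--             ei += 1
--         else:
--             out.append(odds[oi])
--             oi += 1
--     return int("".join(str(d) for d in reversed(out)))
-- ===== Notes on version B (the rewrite author's own statement) =====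
-- stated objective: alternative
-- what changed: B never builds str(num) or per-parity bucket lists: it extracts the digits arithmetically with divmod (least significant first), sorts each parity ascending, then walks the number from the least-significant end handing the smallest still-unused digit of matching parity to the lowest place via two index pointers, and joins the reversed assignment; A builds parity buckets from the string, sorts them, and pops the largest from the back per position left to right.
import Mathlib
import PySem

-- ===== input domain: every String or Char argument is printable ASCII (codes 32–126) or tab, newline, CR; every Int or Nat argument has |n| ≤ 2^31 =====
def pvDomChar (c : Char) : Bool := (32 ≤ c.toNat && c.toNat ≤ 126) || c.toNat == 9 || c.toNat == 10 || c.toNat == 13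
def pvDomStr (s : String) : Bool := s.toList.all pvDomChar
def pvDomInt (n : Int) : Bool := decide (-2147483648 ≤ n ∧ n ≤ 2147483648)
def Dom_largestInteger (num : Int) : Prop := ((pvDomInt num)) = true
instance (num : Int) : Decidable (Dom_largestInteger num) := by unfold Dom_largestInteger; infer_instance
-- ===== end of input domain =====

-- B extracts the digits arithmetically with divmod (no str(num)) and assigns the smallest
-- still-unused digit of each parity to the lowest place, walking least-significant first
-- with two index pointers, instead of A's per-parity char buckets sorted and popped from
-- the back left to right (objective: alternative; same exact return value).

-- int(c) for a decimal digit character c (the only characters str(num) contains under Pre_); exact there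
def pvDigitInt (c : Char) : Int := (c.toNat : Int) - 48

-- ===== PORT A =====
def largestInteger (num : Int) : Int :=
  let s := PySem.Int.toChars num
  let parity := s.map (fun c => PySem.Int.band (pvDigitInt c) 1)
  -- the dict {0: [], 1: []} (two fixed literal int keys) is represented by the pair of its two entries
  let dig :=
    (PySem.List.pyRange 0 (PySem.List.len s) 1).foldl
      (fun (d : List Char × List Char) i =>
        if PySem.List.pyGetD parity i 0 = 0 then
          (d.1 ++ [PySem.List.pyGetD s i ' '], d.2)
        else
          (d.1, d.2 ++ [PySem.List.pyGetD s i ' ']))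
      ([], [])
  let e := PySem.List.sorted dig.1 (fun c => c) false
  let o := PySem.List.sorted dig.2 (fun c => c) false
  let res :=
    parity.foldl
      (fun (st : List Char × List Char × List Char) (p : Int) =>
        if p = 0 then
          match PySem.List.pop? st.2.1 with
          | some (v, rest) => (st.1 ++ [v], rest, st.2.2)
          | none => st      -- IndexError in Python; unreachable under Pre_
        else
          match PySem.List.pop? st.2.2 with
          | some (v, rest) => (st.1 ++ [v], st.2.1, rest)
          | none => st)
      ([], e, o)
  (PySem.Int.ofChars? res.1).getD 0   -- int(result); never none under Pre_ (nonempty digit string)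

-- ===== PORT B =====
-- the while-divmod loop of Source B; the Nat argument is fuel making the recursion structural
-- (num.toNat + 1 iterations always suffice: n shrinks by a factor 10 while n > 9)
def pvExtract : Nat → Int → List Int
  | 0, _ => []
  | f + 1, n =>
    if 9 < n then PySem.Int.mod n 10 :: pvExtract f (PySem.Int.floordiv n 10) else [n]

def largestInteger_alt (num : Int) : Int :=
  let digs := pvExtract (num.toNat + 1) num
  let evens := PySem.List.sorted (digs.filter (fun d => PySem.Int.mod d 2 == 0)) (fun d => d) false
  let odds := PySem.List.sorted (digs.filter (fun d => PySem.Int.mod d 2 == 1)) (fun d => d) false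
  let st :=
    digs.foldl
      (fun (st : List Int × Int × Int) d =>
        if PySem.Int.mod d 2 = 0 then
          (st.1 ++ [PySem.List.pyGetD evens st.2.1 0], st.2.1 + 1, st.2.2)
        else
          (st.1 ++ [PySem.List.pyGetD odds st.2.2 0], st.2.1, st.2.2 + 1))
      ([], 0, 0)
  (PySem.Int.ofChars? ((st.1.reverse.map PySem.Int.toChars).flatten)).getD 0
    -- int("".join(str(d) for d in reversed(out))); never none (out nonempty)

-- ===== PRECONDITION & SPEC =====
-- Python A raises ValueError on num < 0 (int('-') on the sign character of str(num)).
def Pre_largestInteger (num : Int) : Prop := 0 ≤ num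
instance (num : Int) : Decidable (Pre_largestInteger num) := by unfold Pre_largestInteger; infer_instance
def pvWitness_largestInteger : Int := 1234

def Spec_largestInteger (num : Int) (out : Int) : Prop := out = largestInteger_alt num
instance (num : Int) (out : Int) : Decidable (Spec_largestInteger num out) := by unfold Spec_largestInteger; infer_instance

-- ===== CLAIM (what is proved, stated in full; the proofs are below) =====
def Claim_equal_largestInteger : Prop := ∀ (num : Int), Dom_largestInteger num → Pre_largestInteger num → Spec_largestInteger num (largestInteger num)

-- ===== LEMMAS AND PROOFS =====

-- the parity function int(c) & 1 of port A (definitionally the port's lambda)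
def pvF (c : Char) : Int := PySem.Int.band (pvDigitInt c) 1

-- str(d) for one digit 0 ≤ d ≤ 9, as a character
def pvDch (d : Int) : Char := Nat.digitChar d.toNat

def pvDigits : List Char := ['0','1','2','3','4','5','6','7','8','9']
def pvEvens : List Char := ['0','2','4','6','8']
def pvOdds : List Char := ['1','3','5','7','9']
def pvDigitsI : List Int := [0,1,2,3,4,5,6,7,8,9]
def pvEvensI : List Int := [0,2,4,6,8]
def pvOddsI : List Int := [1,3,5,7,9]

-- the consumption step of port A (pop from the back) and its reversed form (pop from the front)
def pvAstep (st : List Char × List Char × List Char) (p : Int) : List Char × List Char × List Char :=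
  if p = 0 then
    match PySem.List.pop? st.2.1 with
    | some (v, rest) => (st.1 ++ [v], rest, st.2.2)
    | none => st
  else
    match PySem.List.pop? st.2.2 with
    | some (v, rest) => (st.1 ++ [v], st.2.1, rest)
    | none => st

def pvBstep (st : List Char × List Char × List Char) (p : Int) : List Char × List Char × List Char :=
  if p = 0 then
    match PySem.List.pop? st.2.1 0 with
    | some (v, rest) => (st.1 ++ [v], rest, st.2.2)
    | none => st
  else
    match PySem.List.pop? st.2.2 0 with
    | some (v, rest) => (st.1 ++ [v], st.2.1, rest)
    | none => st

def pvBlocks {α : Type} (k : α → Nat) (l : List α) : List α :=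
  l.flatMap (fun c => List.replicate (k c) c)

-- the common assignment combinator: give each parity position the front of its bucket
def pvAssign {α : Type} (dflt : α) : List Int → List α → List α → List α
  | [], _, _ => []
  | p :: ps, e, o =>
    if p = 0 then e.headD dflt :: pvAssign dflt ps e.tail o
    else o.headD dflt :: pvAssign dflt ps e o.tail

theorem pv_assign_cons {α : Type} (dflt : α) (p : Int) (ps : List Int) (e o : List α) :
    pvAssign dflt (p :: ps) e o =
      if p = 0 then e.headD dflt :: pvAssign dflt ps e.tail o
      else o.headD dflt :: pvAssign dflt ps e o.tail := rfl

theorem pv_char_eq_of_toNat (a b : Char) (h : a.toNat = b.toNat) : a = b := by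
  apply Char.ext; exact UInt32.toNat_inj.mp h

theorem pv_digitChar_digit (k : Nat) (h : k < 10) :
    48 ≤ (Nat.digitChar k).toNat ∧ (Nat.digitChar k).toNat ≤ 57 := by
  interval_cases k <;> decide

theorem pv_toDigits_digit (m : Nat) :
    ∀ c ∈ Nat.toDigits 10 m, 48 ≤ c.toNat ∧ c.toNat ≤ 57 := by
  induction m using Nat.strong_induction_on with
  | _ m ih =>
    rw [Nat.toDigits_eq_if (by norm_num)]
    by_cases hm : m < 10
    · simp only [if_pos hm, List.mem_singleton]
      rintro c rfl; exact pv_digitChar_digit m hm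
    · simp only [if_neg hm]
      intro c hc
      rcases List.mem_append.mp hc with h | h
      · exact ih (m / 10) (Nat.div_lt_self (by omega) (by norm_num)) c h
      · rcases List.mem_singleton.mp h with rfl
        exact pv_digitChar_digit _ (Nat.mod_lt _ (by norm_num))

theorem pv_toChars_digit (n : Int) (h : 0 ≤ n) :
    ∀ c ∈ PySem.Int.toChars n, 48 ≤ c.toNat ∧ c.toNat ≤ 57 := by
  unfold PySem.Int.toChars
  rw [if_neg (by omega)]
  exact pv_toDigits_digit n.toNat

theorem pv_digit_mem (c : Char) (h1 : 48 ≤ c.toNat) (h2 : c.toNat ≤ 57) : c ∈ pvDigits := by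
  have h : c.toNat = 48 ∨ c.toNat = 49 ∨ c.toNat = 50 ∨ c.toNat = 51 ∨ c.toNat = 52 ∨
      c.toNat = 53 ∨ c.toNat = 54 ∨ c.toNat = 55 ∨ c.toNat = 56 ∨ c.toNat = 57 := by omega
  rcases h with h|h|h|h|h|h|h|h|h|h
  · rw [pv_char_eq_of_toNat c '0' (by rw [h]; decide)]; simp [pvDigits]
  · rw [pv_char_eq_of_toNat c '1' (by rw [h]; decide)]; simp [pvDigits]
  · rw [pv_char_eq_of_toNat c '2' (by rw [h]; decide)]; simp [pvDigits]
  · rw [pv_char_eq_of_toNat c '3' (by rw [h]; decide)]; simp [pvDigits]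
  · rw [pv_char_eq_of_toNat c '4' (by rw [h]; decide)]; simp [pvDigits]
  · rw [pv_char_eq_of_toNat c '5' (by rw [h]; decide)]; simp [pvDigits]
  · rw [pv_char_eq_of_toNat c '6' (by rw [h]; decide)]; simp [pvDigits]
  · rw [pv_char_eq_of_toNat c '7' (by rw [h]; decide)]; simp [pvDigits]
  · rw [pv_char_eq_of_toNat c '8' (by rw [h]; decide)]; simp [pvDigits]
  · rw [pv_char_eq_of_toNat c '9' (by rw [h]; decide)]; simp [pvDigits]

-- A's building loop: the dict entries are the two parity filters of s
theorem pv_split_fold (l : List Char) : ∀ acc : List Char × List Char,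
    l.foldl (fun d c => if pvF c = 0 then (d.1 ++ [c], d.2) else (d.1, d.2 ++ [c])) acc
      = (acc.1 ++ l.filter (fun c => pvF c == 0), acc.2 ++ l.filter (fun c => !(pvF c == 0))) := by
  induction l with
  | nil => intro acc; simp
  | cons c l ih =>
    intro acc
    by_cases hc : pvF c = 0
    · simp [hc, ih, List.append_assoc]
    · simp [hc, ih, List.append_assoc]

theorem pv_digA (s : List Char) :
    (PySem.List.pyRange 0 (PySem.List.len s) 1).foldl
      (fun (d : List Char × List Char) i =>
        if PySem.List.pyGetD (s.map (fun c => PySem.Int.band (pvDigitInt c) 1)) i 0 = 0 then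
          (d.1 ++ [PySem.List.pyGetD s i ' '], d.2)
        else
          (d.1, d.2 ++ [PySem.List.pyGetD s i ' ']))
      ([], [])
    = (s.filter (fun c => pvF c == 0), s.filter (fun c => !(pvF c == 0))) := by
  have key : ∀ i : Int,
      PySem.List.pyGetD (s.map (fun c => PySem.Int.band (pvDigitInt c) 1)) i 0
        = pvF (PySem.List.pyGetD s i ' ') := by
    intro i
    conv_lhs => rw [show (0 : Int) = pvF ' ' from by decide]
    exact PySem.List.pyGetD_map pvF s i ' '
  have hfun : (fun (d : List Char × List Char) i =>
        if PySem.List.pyGetD (s.map (fun c => PySem.Int.band (pvDigitInt c) 1)) i 0 = 0 then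
          (d.1 ++ [PySem.List.pyGetD s i ' '], d.2)
        else
          (d.1, d.2 ++ [PySem.List.pyGetD s i ' ']))
      = (fun (d : List Char × List Char) i =>
          (fun (d : List Char × List Char) c =>
            if pvF c = 0 then (d.1 ++ [c], d.2) else (d.1, d.2 ++ [c])) d (PySem.List.pyGetD s i ' ')) := by
    funext d i; rw [key]
  rw [hfun, PySem.List.foldl_pyRange_zero_pyGetD s ' '
    (fun (d : List Char × List Char) c =>
      if pvF c = 0 then (d.1 ++ [c], d.2) else (d.1, d.2 ++ [c])) ([], []),
    pv_split_fold]
  simp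

theorem pv_blocks_pairwise {α : Type} [LinearOrder α] (k : α → Nat) :
    ∀ l : List α, l.Pairwise (· ≤ ·) → (pvBlocks k l).Pairwise (fun a b => a ≤ b) := by
  intro l
  induction l with
  | nil => intro _; simp [pvBlocks]
  | cons c l ih =>
    intro h
    rw [List.pairwise_cons] at h
    unfold pvBlocks
    rw [List.flatMap_cons, List.pairwise_append]
    refine ⟨List.pairwise_replicate.mpr (Or.inr (le_refl c)), ih h.2, ?_⟩
    intro a ha b hb
    obtain ⟨cc, hcc, hbr⟩ := List.mem_flatMap.mp hb
    rw [List.eq_of_mem_replicate ha, List.eq_of_mem_replicate hbr]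
    exact h.1 cc hcc

theorem pv_blocks_count {α : Type} [DecidableEq α] (k : α → Nat) :
    ∀ (l : List α), l.Nodup → ∀ a : α,
      (pvBlocks k l).count a = if a ∈ l then k a else 0 := by
  intro l
  induction l with
  | nil => intro _ a; simp [pvBlocks]
  | cons c l ih =>
    intro hnd a
    rw [List.nodup_cons] at hnd
    unfold pvBlocks
    rw [List.flatMap_cons, List.count_append, List.count_replicate]
    have ihc := ih hnd.2 a
    unfold pvBlocks at ihc
    rw [ihc]
    by_cases hac : a = c
    · subst hac
      simp [hnd.1]
    · simp [Ne.symm hac, hac]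

-- sorted(parity filter) written as the explicit ascending concatenation of blocks
theorem pv_sorted_filter {α : Type} [LinearOrder α] (s : List α) (univ : List α)
    (hd : ∀ c ∈ s, c ∈ univ)
    (l : List α) (hsub : ∀ c ∈ l, c ∈ univ) (hnd : l.Nodup) (hord : l.Pairwise (· ≤ ·))
    (p : α → Bool) (hiff : ∀ c ∈ univ, p c = true ↔ c ∈ l) :
    PySem.List.sorted (s.filter p) (fun c => c) false = pvBlocks (fun c => s.count c) l := by
  apply PySem.List.sorted_id_eq_of_perm_of_pairwise
  · rw [List.perm_iff_count]
    intro a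
    rw [pv_blocks_count _ l hnd a]
    by_cases hal : a ∈ l
    · rw [if_pos hal]
      exact (List.count_filter ((hiff a (hsub a hal)).mpr hal)).symm
    · rw [if_neg hal]
      symm
      rw [List.count_eq_zero]
      intro hmem
      rcases List.mem_filter.mp hmem with ⟨has, hpa⟩
      have : a ∈ univ := hd a has
      exact hal ((hiff a this).mp hpa)
  · exact pv_blocks_pairwise _ l hord

theorem pv_sorted_even (s : List Char) (hd : ∀ c ∈ s, 48 ≤ c.toNat ∧ c.toNat ≤ 57) :
    PySem.List.sorted (s.filter (fun c => pvF c == 0)) (fun c => c) false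
      = pvBlocks (fun c => s.count c) pvEvens :=
  pv_sorted_filter s pvDigits
    (fun c hc => pv_digit_mem c (hd c hc).1 (hd c hc).2)
    pvEvens
    (by intro c hc; fin_cases hc <;> simp [pvDigits])
    (by simp [pvEvens])
    (by simp [pvEvens, List.pairwise_cons])
    _
    (by intro c hc; fin_cases hc <;> simp [pvF, pvDigitInt, pvEvens] <;> decide)

theorem pv_sorted_odd (s : List Char) (hd : ∀ c ∈ s, 48 ≤ c.toNat ∧ c.toNat ≤ 57) :
    PySem.List.sorted (s.filter (fun c => !(pvF c == 0))) (fun c => c) false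
      = pvBlocks (fun c => s.count c) pvOdds :=
  pv_sorted_filter s pvDigits
    (fun c hc => pv_digit_mem c (hd c hc).1 (hd c hc).2)
    pvOdds
    (by intro c hc; fin_cases hc <;> simp [pvDigits])
    (by simp [pvOdds])
    (by simp [pvOdds, List.pairwise_cons])
    _
    (by intro c hc; fin_cases hc <;> simp [pvF, pvDigitInt, pvOdds] <;> decide)

-- consuming from the back (A's fold) = consuming the reversed lists from the front
theorem pv_consume : ∀ (ps : List Int) (acc e o : List Char),
    ps.countP (fun p => p == 0) ≤ e.length →
    ps.countP (fun p => !(p == 0)) ≤ o.length →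
    (ps.foldl pvAstep (acc, e, o)).1 = (ps.foldl pvBstep (acc, e.reverse, o.reverse)).1 := by
  intro ps
  induction ps with
  | nil => intro acc e o _ _; simp
  | cons p ps ih =>
    intro acc e o he ho
    by_cases hp : p = 0
    · subst hp
      rw [List.countP_cons_of_pos (by simp)] at he
      rcases List.eq_nil_or_concat e with rfl | ⟨ys, y, rfl⟩
      · simp at he
      · rw [List.concat_eq_append] at *
        rw [List.foldl_cons, List.foldl_cons]
        have hA : pvAstep (acc, ys ++ [y], o) 0 = (acc ++ [y], ys, o) := by
          unfold pvAstep
          rw [if_pos rfl, PySem.List.pop?_last]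
        have hB : pvBstep (acc, (ys ++ [y]).reverse, o.reverse) 0
            = (acc ++ [y], ys.reverse, o.reverse) := by
          unfold pvBstep
          rw [if_pos rfl]
          simp only [List.reverse_append, List.reverse_singleton, List.singleton_append,
            PySem.List.pop?_zero_cons]
        rw [hA, hB]
        have he' : ps.countP (fun p => p == 0) ≤ ys.length := by
          simp at he ⊢; omega
        have ho' : ps.countP (fun p => !(p == 0)) ≤ o.length := by
          rw [List.countP_cons_of_neg (by simp)] at ho; exact ho
        exact ih (acc ++ [y]) ys o he' ho'
    · rw [List.countP_cons_of_neg (by simp [hp])] at he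
      rw [List.countP_cons_of_pos (by simp [hp])] at ho
      rcases List.eq_nil_or_concat o with rfl | ⟨ys, y, rfl⟩
      · simp at ho
      · rw [List.concat_eq_append] at *
        rw [List.foldl_cons, List.foldl_cons]
        have hA : pvAstep (acc, e, ys ++ [y]) p = (acc ++ [y], e, ys) := by
          unfold pvAstep
          rw [if_neg hp, PySem.List.pop?_last]
        have hB : pvBstep (acc, e.reverse, (ys ++ [y]).reverse) p
            = (acc ++ [y], e.reverse, ys.reverse) := by
          unfold pvBstep
          rw [if_neg hp]
          simp only [List.reverse_append, List.reverse_singleton, List.singleton_append,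
            PySem.List.pop?_zero_cons]
        rw [hA, hB]
        have ho' : ps.countP (fun p => !(p == 0)) ≤ ys.length := by
          simp at ho ⊢; omega
        exact ih (acc ++ [y]) e ys he ho'

-- A's front-pop fold is the assignment combinator
theorem pv_foldA : ∀ (ps : List Int) (acc e o : List Char),
    ps.countP (fun p => p == 0) ≤ e.length →
    ps.countP (fun p => !(p == 0)) ≤ o.length →
    (ps.foldl pvBstep (acc, e, o)).1 = acc ++ pvAssign ' ' ps e o := by
  intro ps
  induction ps with
  | nil => intro acc e o _ _; simp [pvAssign]
  | cons p ps ih =>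
    intro acc e o he ho
    rw [List.foldl_cons]
    by_cases hp : p = 0
    · subst hp
      rw [List.countP_cons_of_pos (by simp)] at he
      rcases e with _ | ⟨x, e⟩
      · simp at he
      · have hB : pvBstep (acc, x :: e, o) 0 = (acc ++ [x], e, o) := by
          unfold pvBstep
          rw [if_pos rfl, PySem.List.pop?_zero_cons]
        rw [hB, ih (acc ++ [x]) e o (by simp at he; omega)
          (by rw [List.countP_cons_of_neg (by simp)] at ho; exact ho)]
        rw [pv_assign_cons, if_pos rfl]
        simp
    · rw [List.countP_cons_of_neg (by simp [hp])] at he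
      rw [List.countP_cons_of_pos (by simp [hp])] at ho
      rcases o with _ | ⟨x, o⟩
      · simp at ho
      · have hB : pvBstep (acc, e, x :: o) p = (acc ++ [x], e, o) := by
          unfold pvBstep
          rw [if_neg hp, PySem.List.pop?_zero_cons]
        rw [hB, ih (acc ++ [x]) e o he (by simp at ho; omega)]
        rw [pv_assign_cons, if_neg hp]
        simp

-- B's pointer fold is the assignment combinator on the dropped buckets
theorem pv_foldB (e o : List Int) : ∀ (ds : List Int) (acc : List Int) (i j : Nat),
    (ds.foldl
      (fun (st : List Int × Int × Int) d =>
        if PySem.Int.mod d 2 = 0 then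
          (st.1 ++ [PySem.List.pyGetD e st.2.1 0], st.2.1 + 1, st.2.2)
        else
          (st.1 ++ [PySem.List.pyGetD o st.2.2 0], st.2.1, st.2.2 + 1))
      (acc, (i : Int), (j : Int))).1
    = acc ++ pvAssign 0 (ds.map (fun d => PySem.Int.mod d 2)) (e.drop i) (o.drop j) := by
  intro ds
  induction ds with
  | nil => intro acc i j; simp [pvAssign]
  | cons d ds ih =>
    intro acc i j
    rw [List.foldl_cons, List.map_cons]
    by_cases hd : PySem.Int.mod d 2 = 0
    · rw [if_pos hd]
      have hget : PySem.List.pyGetD e (i : Int) 0 = (e.drop i).headD 0 := by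
        rw [PySem.List.pyGetD_natCast, List.getD_eq_getElem?_getD, List.headD_eq_head?,
          List.head?_drop]
      have hcast : ((i : Int) + 1) = ((i + 1 : Nat) : Int) := by push_cast; ring
      rw [hget, hcast, ih (acc ++ [(e.drop i).headD 0]) (i + 1) j,
        pv_assign_cons, if_pos hd]
      simp [List.tail_drop]
    · rw [if_neg hd]
      have hget : PySem.List.pyGetD o (j : Int) 0 = (o.drop j).headD 0 := by
        rw [PySem.List.pyGetD_natCast, List.getD_eq_getElem?_getD, List.headD_eq_head?,
          List.head?_drop]
      have hcast : ((j : Int) + 1) = ((j + 1 : Nat) : Int) := by push_cast; ring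
      rw [hget, hcast, ih (acc ++ [(o.drop j).headD 0]) i (j + 1),
        pv_assign_cons, if_neg hd]
      simp [List.tail_drop]

-- reversing the parity word and both buckets reverses the assignment
theorem pv_assign_app0 {α : Type} (dflt : α) : ∀ (qs : List Int) (e o : List α) (x : α),
    qs.countP (fun p => p == 0) = e.length →
    qs.countP (fun p => !(p == 0)) ≤ o.length →
    pvAssign dflt (qs ++ [0]) (e ++ [x]) o = pvAssign dflt qs e o ++ [x] := by
  intro qs
  induction qs with
  | nil =>
    intro e o x he _
    have : e = [] := List.eq_nil_of_length_eq_zero (by simp at he; omega)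
    subst this
    rw [List.nil_append, List.nil_append, pv_assign_cons, if_pos rfl]
    simp [pvAssign]
  | cons q qs ih =>
    intro e o x he ho
    by_cases hq : q = 0
    · subst hq
      rw [List.countP_cons_of_pos (by simp)] at he
      rcases e with _ | ⟨y, e⟩
      · simp at he
      · rw [List.cons_append, List.cons_append, pv_assign_cons, if_pos rfl]
        have := ih e o x (by simp at he ⊢; omega)
          (by rw [List.countP_cons_of_neg (by simp)] at ho; exact ho)
        simp only [List.headD_cons, List.tail_cons] at this ⊢
        rw [this]
        simp [pvAssign]
    · rw [List.countP_cons_of_neg (by simp [hq])] at he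
      rw [List.countP_cons_of_pos (by simp [hq])] at ho
      rcases o with _ | ⟨z, o⟩
      · simp at ho
      · rw [List.cons_append, pv_assign_cons, if_neg hq]
        have := ih e o x he (by simp at ho ⊢; omega)
        simp only [List.headD_cons, List.tail_cons]
        rw [this]
        rw [pv_assign_cons, if_neg hq]
        simp

theorem pv_assign_app1 {α : Type} (dflt : α) (p : Int) (hp : ¬ p = 0) :
    ∀ (qs : List Int) (e o : List α) (x : α),
    qs.countP (fun p => !(p == 0)) = o.length →
    qs.countP (fun p => p == 0) ≤ e.length →
    pvAssign dflt (qs ++ [p]) e (o ++ [x]) = pvAssign dflt qs e o ++ [x] := by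
  intro qs
  induction qs with
  | nil =>
    intro e o x ho _
    have : o = [] := List.eq_nil_of_length_eq_zero (by simp at ho; omega)
    subst this
    rw [List.nil_append, List.nil_append, pv_assign_cons, if_neg hp]
    simp [pvAssign]
  | cons q qs ih =>
    intro e o x ho he
    by_cases hq : q = 0
    · subst hq
      rw [List.countP_cons_of_pos (by simp)] at he
      rcases e with _ | ⟨y, e⟩
      · simp at he
      · rw [List.cons_append, pv_assign_cons, if_pos rfl]
        have := ih e o x (by rw [List.countP_cons_of_neg (by simp)] at ho; exact ho)
          (by simp at he ⊢; omega)
        simp only [List.headD_cons, List.tail_cons]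
        rw [this]
        rw [pv_assign_cons, if_pos rfl]
        simp
    · rw [List.countP_cons_of_neg (by simp [hq])] at he
      rw [List.countP_cons_of_pos (by simp [hq])] at ho
      rcases o with _ | ⟨z, o⟩
      · simp at ho
      · rw [List.cons_append, List.cons_append, pv_assign_cons, if_neg hq]
        have := ih e o x (by simp at ho ⊢; omega) he
        simp only [List.headD_cons, List.tail_cons]
        rw [this]
        rw [pv_assign_cons, if_neg hq]
        simp

theorem pv_assign_rev {α : Type} (dflt : α) : ∀ (ps : List Int) (e o : List α),
    ps.countP (fun p => p == 0) = e.length →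
    ps.countP (fun p => !(p == 0)) = o.length →
    (pvAssign dflt ps e o).reverse = pvAssign dflt ps.reverse e.reverse o.reverse := by
  intro ps
  induction ps with
  | nil =>
    intro e o he ho
    have he' : e = [] := List.eq_nil_of_length_eq_zero (by simp at he; omega)
    have ho' : o = [] := List.eq_nil_of_length_eq_zero (by simp at ho; omega)
    subst he'; subst ho'
    simp [pvAssign]
  | cons p ps ih =>
    intro e o he ho
    by_cases hp : p = 0
    · subst hp
      rw [List.countP_cons_of_pos (by simp)] at he
      rw [List.countP_cons_of_neg (by simp)] at ho
      rcases e with _ | ⟨x, e⟩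
      · simp at he
      · rw [pv_assign_cons, if_pos rfl]
        simp only [List.headD_cons, List.tail_cons, List.reverse_cons]
        rw [ih e o (by simp at he ⊢; omega) ho]
        exact (pv_assign_app0 dflt ps.reverse e.reverse o.reverse x
          (by rw [List.countP_reverse, List.length_reverse]; simp at he ⊢; omega)
          (by rw [List.countP_reverse, List.length_reverse]; omega)).symm
    · rw [List.countP_cons_of_neg (by simp [hp])] at he
      rw [List.countP_cons_of_pos (by simp [hp])] at ho
      rcases o with _ | ⟨x, o⟩
      · simp at ho
      · rw [pv_assign_cons, if_neg hp]
        simp only [List.headD_cons, List.tail_cons, List.reverse_cons]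
        rw [ih e o he (by simp at ho ⊢; omega)]
        exact (pv_assign_app1 dflt p hp ps.reverse e.reverse o.reverse x
          (by rw [List.countP_reverse, List.length_reverse]; simp at ho ⊢; omega)
          (by rw [List.countP_reverse, List.length_reverse]; omega)).symm

-- mapping a function over both buckets commutes with the assignment
theorem pv_assign_map {α β : Type} (f : α → β) (da : α) : ∀ (ps : List Int) (e o : List α),
    ps.countP (fun p => p == 0) ≤ e.length →
    ps.countP (fun p => !(p == 0)) ≤ o.length →
    (pvAssign da ps e o).map f = pvAssign (f da) ps (e.map f) (o.map f) := by
  intro ps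
  induction ps with
  | nil => intro e o _ _; simp [pvAssign]
  | cons p ps ih =>
    intro e o he ho
    by_cases hp : p = 0
    · subst hp
      rw [List.countP_cons_of_pos (by simp)] at he
      rcases e with _ | ⟨x, e⟩
      · simp at he
      · rw [pv_assign_cons, if_pos rfl]
        simp only [List.headD_cons, List.tail_cons, List.map_cons]
        rw [ih e o (by simp at he; omega)
          (by rw [List.countP_cons_of_neg (by simp)] at ho; exact ho)]
        rw [pv_assign_cons, if_pos rfl]
        simp
    · rw [List.countP_cons_of_neg (by simp [hp])] at he
      rw [List.countP_cons_of_pos (by simp [hp])] at ho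
      rcases o with _ | ⟨x, o⟩
      · simp at ho
      · rw [pv_assign_cons, if_neg hp]
        simp only [List.headD_cons, List.tail_cons, List.map_cons]
        rw [ih e o he (by simp at ho; omega)]
        rw [pv_assign_cons, if_neg hp]
        simp

-- every assigned digit is a bucket element or the (never used) default
theorem pv_assign_mem {α : Type} (dflt : α) : ∀ (ps : List Int) (e o : List α),
    ∀ x ∈ pvAssign dflt ps e o, x ∈ e ∨ x ∈ o ∨ x = dflt := by
  intro ps
  induction ps with
  | nil => intro e o x hx; simp [pvAssign] at hx
  | cons p ps ih =>
    intro e o x hx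
    by_cases hp : p = 0
    · subst hp
      unfold pvAssign at hx
      rw [if_pos rfl] at hx
      rcases List.mem_cons.mp hx with rfl | hx'
      · rcases e with _ | ⟨y, e⟩
        · right; right; rfl
        · left; simp
      · rcases ih e.tail o x hx' with h | h | h
        · left; exact List.mem_of_mem_tail h
        · right; left; exact h
        · right; right; exact h
    · unfold pvAssign at hx
      rw [if_neg hp] at hx
      rcases List.mem_cons.mp hx with rfl | hx'
      · rcases o with _ | ⟨y, o⟩
        · right; right; rfl
        · right; left; simp
      · rcases ih e o.tail x hx' with h | h | h
        · left; exact h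
        · right; left; exact List.mem_of_mem_tail h
        · right; right; exact h

-- digit extraction: value bounds and the str(num) correspondence
theorem pv_extract_bounds : ∀ (f : Nat) (n : Int), 0 ≤ n →
    ∀ d ∈ pvExtract f n, 0 ≤ d ∧ d < 10 := by
  intro f
  induction f with
  | zero => intro n _ d hd; simp [pvExtract] at hd
  | succ f ih =>
    intro n hn d hd
    unfold pvExtract at hd
    by_cases h9 : 9 < n
    · rw [if_pos h9] at hd
      rcases List.mem_cons.mp hd with rfl | hd'
      · exact ⟨PySem.Int.mod_nonneg n (by norm_num), PySem.Int.mod_lt n (by norm_num)⟩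
      · exact ih (PySem.Int.floordiv n 10)
          (by rw [PySem.Int.floordiv_eq_ediv_of_pos (by norm_num)]; omega) d hd'
    · rw [if_neg h9] at hd
      rcases List.mem_singleton.mp hd with rfl
      omega

theorem pv_extract_toChars : ∀ (f : Nat) (n : Int), 0 ≤ n → n < (f : Int) →
    ((pvExtract f n).reverse).map pvDch = PySem.Int.toChars n := by
  intro f
  induction f with
  | zero => intro n h0 h1; omega
  | succ f ih =>
    intro n h0 h1
    unfold pvExtract
    by_cases h9 : 9 < n
    · rw [if_pos h9]
      have hq : PySem.Int.floordiv n 10 = n / 10 := PySem.Int.floordiv_eq_ediv_of_pos (by norm_num)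
      rw [List.reverse_cons, List.map_append, hq]
      rw [ih (n / 10) (by omega) (by push_cast at h1 ⊢; omega)]
      unfold PySem.Int.toChars
      rw [if_neg (by omega), if_neg (by omega)]
      rw [Nat.toDigits_eq_if (by norm_num) (n := n.toNat)]
      rw [if_neg (by omega)]
      have hdiv : (n / 10).toNat = n.toNat / 10 := by omega
      have hmod : (PySem.Int.mod n 10).toNat = n.toNat % 10 := by
        rw [PySem.Int.mod_eq_emod_of_pos (by norm_num)]; omega
      rw [hdiv, List.map_singleton]
      congr 1
      unfold pvDch
      rw [hmod]
    · rw [if_neg h9]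
      unfold PySem.Int.toChars
      rw [if_neg (by omega)]
      rw [Nat.toDigits_eq_if (by norm_num) (n := n.toNat)]
      rw [if_pos (by omega)]
      simp [pvDch]

theorem pv_dch_code (d : Int) (h0 : 0 ≤ d) (h1 : d < 10) : (pvDch d).toNat = 48 + d.toNat := by
  interval_cases d <;> decide

theorem pv_dch_inj (x d : Int) (hx0 : 0 ≤ x) (hx1 : x < 10) (hd0 : 0 ≤ d) (hd1 : d < 10)
    (h : pvDch x = pvDch d) : x = d := by
  have := pv_dch_code x hx0 hx1
  have := pv_dch_code d hd0 hd1
  have : (pvDch x).toNat = (pvDch d).toNat := by rw [h]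
  omega

theorem pv_parity_dch (d : Int) (h0 : 0 ≤ d) (h1 : d < 10) :
    pvF (pvDch d) = PySem.Int.mod d 2 := by
  interval_cases d <;> decide

theorem pv_count_dch (digs : List Int) (hb : ∀ x ∈ digs, 0 ≤ x ∧ x < 10)
    (d : Int) (h0 : 0 ≤ d) (h1 : d < 10) :
    (digs.map pvDch).count (pvDch d) = digs.count d := by
  induction digs with
  | nil => simp
  | cons x l ih =>
    have hbl : ∀ y ∈ l, 0 ≤ y ∧ y < 10 := fun y hy => hb y (List.mem_cons_of_mem x hy)
    have hx := hb x List.mem_cons_self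
    rw [List.map_cons]
    by_cases hxd : x = d
    · subst hxd
      rw [List.count_cons_self, List.count_cons_self, ih hbl]
    · rw [List.count_cons_of_ne (fun hc => hxd (pv_dch_inj x d hx.1 hx.2 h0 h1 hc)),
        List.count_cons_of_ne hxd, ih hbl]

-- str(d) of a single digit is one character
theorem pv_toChars_single (d : Int) (h0 : 0 ≤ d) (h1 : d < 10) :
    PySem.Int.toChars d = [pvDch d] := by
  interval_cases d <;> decide

theorem pv_join_single (l : List Int) (hb : ∀ x ∈ l, 0 ≤ x ∧ x < 10) :
    (l.map PySem.Int.toChars).flatten = l.map pvDch := by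
  induction l with
  | nil => simp
  | cons x l ih =>
    have hx := hb x List.mem_cons_self
    rw [List.map_cons, List.map_cons, List.flatten_cons,
      pv_toChars_single x hx.1 hx.2,
      ih (fun y hy => hb y (List.mem_cons_of_mem x hy))]
    rfl

-- default-independence of the assignment under exact feeding
theorem pv_assign_dflt {α : Type} (d1 d2 : α) : ∀ (ps : List Int) (e o : List α),
    ps.countP (fun p => p == 0) ≤ e.length →
    ps.countP (fun p => !(p == 0)) ≤ o.length →
    pvAssign d1 ps e o = pvAssign d2 ps e o := by
  intro ps
  induction ps with
  | nil => intro e o _ _; rfl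
  | cons p ps ih =>
    intro e o he ho
    by_cases hp : p = 0
    · subst hp
      rw [List.countP_cons_of_pos (by simp)] at he
      rcases e with _ | ⟨x, e⟩
      · simp at he
      · rw [pv_assign_cons, if_pos rfl, pv_assign_cons, if_pos rfl]
        simp only [List.headD_cons, List.tail_cons]
        rw [ih e o (by simp at he; omega)
          (by rw [List.countP_cons_of_neg (by simp)] at ho; exact ho)]
    · rw [List.countP_cons_of_neg (by simp [hp])] at he
      rw [List.countP_cons_of_pos (by simp [hp])] at ho
      rcases o with _ | ⟨x, o⟩
      · simp at ho
      · rw [pv_assign_cons, if_neg hp, pv_assign_cons, if_neg hp]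
        simp only [List.headD_cons, List.tail_cons]
        rw [ih e o he (by simp at ho; omega)]

theorem pv_blocks_mem {α : Type} (k : α → Nat) (l : List α) :
    ∀ x ∈ pvBlocks k l, x ∈ l := by
  intro x hx
  obtain ⟨c, hc, hr⟩ := List.mem_flatMap.mp hx
  rw [List.eq_of_mem_replicate hr]
  exact hc

theorem pv_digit_memI (c : Int) (h0 : 0 ≤ c) (h1 : c < 10) : c ∈ pvDigitsI := by
  unfold pvDigitsI
  simp only [List.mem_cons, List.not_mem_nil, or_false]
  omega

-- B's two sorted buckets written as ascending int blocks
theorem pv_sorted_evenI (digs : List Int) (hb : ∀ d ∈ digs, 0 ≤ d ∧ d < 10) :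
    PySem.List.sorted (digs.filter (fun d => PySem.Int.mod d 2 == 0)) (fun d => d) false
      = pvBlocks (fun d => digs.count d) pvEvensI :=
  pv_sorted_filter digs pvDigitsI
    (fun d hd => pv_digit_memI d (hb d hd).1 (hb d hd).2)
    pvEvensI
    (by intro c hc; fin_cases hc <;> decide)
    (by decide)
    (by decide)
    _
    (by intro c hc; fin_cases hc <;> decide)

theorem pv_sorted_oddI (digs : List Int) (hb : ∀ d ∈ digs, 0 ≤ d ∧ d < 10) :
    PySem.List.sorted (digs.filter (fun d => PySem.Int.mod d 2 == 1)) (fun d => d) false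
      = pvBlocks (fun d => digs.count d) pvOddsI :=
  pv_sorted_filter digs pvDigitsI
    (fun d hd => pv_digit_memI d (hb d hd).1 (hb d hd).2)
    pvOddsI
    (by intro c hc; fin_cases hc <;> decide)
    (by decide)
    (by decide)
    _
    (by intro c hc; fin_cases hc <;> decide)

-- ===== VERDICT (by name: the statement is the Claim_ definition above) =====
set_option maxHeartbeats 2000000 in
theorem largestInteger_spec : Claim_equal_largestInteger := by
  intro num _ hpre
  have h0 : (0 : Int) ≤ num := hpre
  have hdigb := pv_extract_bounds (num.toNat + 1) num h0
  have hs : ((pvExtract (num.toNat + 1) num).reverse).map pvDch = PySem.Int.toChars num :=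
    pv_extract_toChars (num.toNat + 1) num h0 (by push_cast; omega)
  have hd := pv_toChars_digit num h0
  set digs := pvExtract (num.toNat + 1) num with hdigs
  set s := PySem.Int.toChars num with hsdef
  -- counts of each digit agree between s and digs
  have hcnt : ∀ d : Int, 0 ≤ d → d < 10 → s.count (pvDch d) = digs.count d := by
    intro d hd0 hd1
    rw [← hs, pv_count_dch digs.reverse
      (fun x hx => hdigb x (List.mem_reverse.mp hx)) d hd0 hd1, List.count_reverse]
  -- the parity word of s is the reversed parity word of digs
  have hps : s.map pvF = (digs.map (fun d => PySem.Int.mod d 2)).reverse := by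
    rw [← hs, List.map_map, ← List.map_reverse]
    exact List.map_congr_left (fun x hx => by
      have hb := hdigb x (List.mem_reverse.mp hx)
      exact pv_parity_dch x hb.1 hb.2)
  -- char buckets = digit-char image of int buckets
  have hbe : pvBlocks (fun c => s.count c) pvEvens
      = (pvBlocks (fun d => digs.count d) pvEvensI).map pvDch := by
    have e0 := hcnt 0 (by norm_num) (by norm_num)
    have e2 := hcnt 2 (by norm_num) (by norm_num)
    have e4 := hcnt 4 (by norm_num) (by norm_num)
    have e6 := hcnt 6 (by norm_num) (by norm_num)
    have e8 := hcnt 8 (by norm_num) (by norm_num)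
    rw [show pvDch 0 = '0' from by decide] at e0
    rw [show pvDch 2 = '2' from by decide] at e2
    rw [show pvDch 4 = '4' from by decide] at e4
    rw [show pvDch 6 = '6' from by decide] at e6
    rw [show pvDch 8 = '8' from by decide] at e8
    simp only [pvBlocks, pvEvens, pvEvensI, List.flatMap_cons, List.flatMap_nil,
      List.map_append, List.map_replicate, List.append_nil,
      show pvDch 0 = '0' from by decide, show pvDch 2 = '2' from by decide,
      show pvDch 4 = '4' from by decide, show pvDch 6 = '6' from by decide,
      show pvDch 8 = '8' from by decide, e0, e2, e4, e6, e8]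
  have hbo : pvBlocks (fun c => s.count c) pvOdds
      = (pvBlocks (fun d => digs.count d) pvOddsI).map pvDch := by
    have e1 := hcnt 1 (by norm_num) (by norm_num)
    have e3 := hcnt 3 (by norm_num) (by norm_num)
    have e5 := hcnt 5 (by norm_num) (by norm_num)
    have e7 := hcnt 7 (by norm_num) (by norm_num)
    have e9 := hcnt 9 (by norm_num) (by norm_num)
    rw [show pvDch 1 = '1' from by decide] at e1
    rw [show pvDch 3 = '3' from by decide] at e3
    rw [show pvDch 5 = '5' from by decide] at e5
    rw [show pvDch 7 = '7' from by decide] at e7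
    rw [show pvDch 9 = '9' from by decide] at e9
    simp only [pvBlocks, pvOdds, pvOddsI, List.flatMap_cons, List.flatMap_nil,
      List.map_append, List.map_replicate, List.append_nil,
      show pvDch 1 = '1' from by decide, show pvDch 3 = '3' from by decide,
      show pvDch 5 = '5' from by decide, show pvDch 7 = '7' from by decide,
      show pvDch 9 = '9' from by decide, e1, e3, e5, e7, e9]
  -- bucket sizes = parity counts
  have hlenE : (s.map pvF).countP (fun p => p == 0)
      = (pvBlocks (fun c => s.count c) pvEvens).length := by
    rw [← pv_sorted_even s hd, PySem.List.length_sorted, List.countP_map,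
      List.countP_eq_length_filter]
    rfl
  have hlenO : (s.map pvF).countP (fun p => !(p == 0))
      = (pvBlocks (fun c => s.count c) pvOdds).length := by
    rw [← pv_sorted_odd s hd, PySem.List.length_sorted, List.countP_map,
      List.countP_eq_length_filter]
    rfl
  have hqE : ((digs.map (fun d => PySem.Int.mod d 2)).countP (fun p => p == 0))
      = (pvBlocks (fun d => digs.count d) pvEvensI).length := by
    rw [← pv_sorted_evenI digs hdigb, PySem.List.length_sorted, List.countP_map,
      List.countP_eq_length_filter]
    rfl
  have hqO : ((digs.map (fun d => PySem.Int.mod d 2)).countP (fun p => !(p == 0)))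
      = (pvBlocks (fun d => digs.count d) pvOddsI).length := by
    rw [← pv_sorted_oddI digs hdigb, PySem.List.length_sorted, List.countP_map,
      List.countP_eq_length_filter]
    congr 1
    refine List.filter_congr (fun x hx => ?_)
    show (!(PySem.Int.mod x 2 == 0)) = (PySem.Int.mod x 2 == 1)
    rcases PySem.Int.mod_two_eq x with h | h <;> rw [h] <;> decide
  show largestInteger num = largestInteger_alt num
  simp only [largestInteger, largestInteger_alt, ← hsdef, ← hdigs]
  rw [pv_digA, pv_sorted_even _ hd, pv_sorted_odd _ hd,
    pv_sorted_evenI digs hdigb, pv_sorted_oddI digs hdigb]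
  rw [show (fun (st : List Char × List Char × List Char) (p : Int) =>
        if p = 0 then
          match PySem.List.pop? st.2.1 with
          | some (v, rest) => (st.1 ++ [v], rest, st.2.2)
          | none => st
        else
          match PySem.List.pop? st.2.2 with
          | some (v, rest) => (st.1 ++ [v], st.2.1, rest)
          | none => st) = pvAstep from rfl]
  rw [show (fun c => PySem.Int.band (pvDigitInt c) 1) = pvF from rfl]
  rw [pv_consume (s.map pvF) [] _ _ (le_of_eq hlenE) (le_of_eq hlenO)]
  rw [pv_foldA (s.map pvF) [] _ _
    (by rw [List.length_reverse]; exact le_of_eq hlenE)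
    (by rw [List.length_reverse]; exact le_of_eq hlenO)]
  rw [show ((0 : Int), (0 : Int)) = (((0 : Nat) : Int), ((0 : Nat) : Int)) from by norm_num]
  rw [pv_foldB _ _ digs [] 0 0]
  simp only [List.drop_zero, List.nil_append]
  -- the B-side result string
  have hmem : ∀ x ∈ pvAssign 0 (digs.map (fun d => PySem.Int.mod d 2))
      (pvBlocks (fun d => digs.count d) pvEvensI) (pvBlocks (fun d => digs.count d) pvOddsI),
      0 ≤ x ∧ x < 10 := by
    intro x hx
    rcases pv_assign_mem 0 _ _ _ x hx with h | h | h
    · have := pv_blocks_mem _ _ x h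
      fin_cases this <;> norm_num
    · have := pv_blocks_mem _ _ x h
      fin_cases this <;> norm_num
    · subst h; norm_num
  rw [pv_join_single _ (by
    intro x hx
    exact hmem x (List.mem_reverse.mp hx))]
  rw [pv_assign_rev 0 _ _ _ hqE hqO]
  rw [pv_assign_map pvDch 0 _ _ _
    (by rw [List.countP_reverse, List.length_reverse]; exact le_of_eq hqE)
    (by rw [List.countP_reverse, List.length_reverse]; exact le_of_eq hqO)]
  rw [show pvDch 0 = '0' from by decide]
  rw [pv_assign_dflt '0' ' ' _ _ _
    (by rw [List.countP_reverse, List.length_map, List.length_reverse]; exact le_of_eq hqE)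
    (by rw [List.countP_reverse, List.length_map, List.length_reverse]; exact le_of_eq hqO)]
  rw [hps, hbe, hbo]
  simp only [← List.map_reverse]
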